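-- pv_equiv track=rewrite | github.com/viking-sudo-rm/dfa-extractor | languages.py | trace_acceptance
-- ===== SOURCE A (Python) =====
-- def trace_acceptance(string):
--     state = "abba"
--     states = []
--     for token in string:
--         states.append(state)
--         if state == "abba" and token == "a":
--             state = "a"
--         elif state == "a" and token == "b":
--             state = "ab"
--         elif state == "ab" and token == "b":
--             state = "abb"
--         elif state == "abb" and token == "a":
--             state = "abba"
--         else:
--             state = "!"
--     states.append(state)
--     return [int(s != "!") for s in states]
-- ===== SOURCE B (Python) =====
-- def trace_acceptance(string):
--     pat = "abba"
--     out = []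
--     alive = True
--     for i, token in enumerate(string):
--         out.append(int(alive))
--         if alive and token != pat[i % 4]:
--             alive = False
--     out.append(int(alive))
--     return out
-- ===== Notes on version B (the rewrite author's own statement) =====
-- stated objective: simpler
-- what changed: Replaces the five named DFA states and the if/elif transition chain with a single alive boolean plus a modular index into the cyclic 4-character pattern, emitting the output directly instead of collecting state names and mapping at the end.
import Mathlib
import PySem

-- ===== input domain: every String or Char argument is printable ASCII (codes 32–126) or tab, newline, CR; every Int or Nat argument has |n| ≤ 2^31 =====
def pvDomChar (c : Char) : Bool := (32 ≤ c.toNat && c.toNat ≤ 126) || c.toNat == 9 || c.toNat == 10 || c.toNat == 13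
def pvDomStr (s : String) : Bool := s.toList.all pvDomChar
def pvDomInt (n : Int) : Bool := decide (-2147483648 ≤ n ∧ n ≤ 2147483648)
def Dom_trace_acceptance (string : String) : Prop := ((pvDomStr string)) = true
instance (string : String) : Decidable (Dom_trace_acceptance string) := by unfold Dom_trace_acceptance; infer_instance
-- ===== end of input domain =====

-- B replaces A's five named DFA states and if/elif transition chain with one alive boolean
-- plus a modular index into the cyclic pattern "abba" (objective: simpler).

-- ===== PORT A =====
-- one step of A's if/elif chain
def pvStepA (state : String) (token : Char) : String :=
  if state == "abba" && token == 'a' then "a"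
  else if state == "a" && token == 'b' then "ab"
  else if state == "ab" && token == 'b' then "abb"
  else if state == "abb" && token == 'a' then "abba"
  else "!"

-- A's loop: collects `state` before each step, plus the final append
def pvLoopA (state : String) (l : List Char) : List String :=
  match l with
  | [] => [state]
  | t :: ts => state :: pvLoopA (pvStepA state t) ts

def trace_acceptance (string : String) : List Int :=
  (pvLoopA "abba" string.toList).map (fun s => if s != "!" then (1 : Int) else 0)

-- ===== PORT B =====
-- B's loop over (index, token): append int(alive), then kill alive on a pattern mismatch
def pvLoopB (pat : List Char) (l : List Char) (i : Nat) (alive : Bool) : List Int :=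
  match l with
  | [] => [if alive then (1 : Int) else 0]
  | t :: ts =>
    (if alive then (1 : Int) else 0) ::
      pvLoopB pat ts (i + 1) (if alive && t != pat.getD (i % 4) ' ' then false else alive)

def trace_acceptance_alt (string : String) : List Int :=
  pvLoopB "abba".toList string.toList 0 true

-- ===== PRECONDITION & SPEC =====
def Spec_trace_acceptance (string : String) (out : List Int) : Prop := out = trace_acceptance_alt string
instance (string : String) (out : List Int) : Decidable (Spec_trace_acceptance string out) := by unfold Spec_trace_acceptance; infer_instance

-- ===== CLAIM (what is proved, stated in full; the proofs are below) =====
def Claim_equal_trace_acceptance : Prop := ∀ (string : String), Dom_trace_acceptance string → Spec_trace_acceptance string (trace_acceptance string)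

-- ===== LEMMAS AND PROOFS =====

-- name of A's live state after i steps without a mismatch
def pvStateName (r : Nat) : String :=
  if r = 0 then "abba" else if r = 1 then "a" else if r = 2 then "ab" else "abb"

-- invariant tying A's state string to B's (alive, index) pair
def pvInv (state : String) (i : Nat) (alive : Bool) : Prop :=
  (alive = true ∧ state = pvStateName (i % 4)) ∨ (alive = false ∧ state = "!")

theorem pvStateName_ne (r : Nat) : (pvStateName r != "!") = true := by
  unfold pvStateName; split_ifs <;> decide

theorem pvStateName_ne' (r : Nat) : pvStateName r ≠ "!" := by
  unfold pvStateName; split_ifs <;> decide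

theorem pvStepLive (r : Nat) (hr : r < 4) (t : Char) :
    pvStepA (pvStateName r) t =
      if t = List.getD "abba".toList r ' ' then pvStateName ((r + 1) % 4) else "!" := by
  interval_cases r <;> simp [pvStepA, pvStateName]

theorem pvStepDead (t : Char) : pvStepA "!" t = "!" := by
  simp [pvStepA]

theorem pvMain : ∀ (l : List Char) (i : Nat) (state : String) (alive : Bool),
    pvInv state i alive →
    (pvLoopA state l).map (fun s => if s != "!" then (1 : Int) else 0)
      = pvLoopB "abba".toList l i alive := by
  intro l
  induction l with
  | nil =>
    intro i state alive hinv
    rcases hinv with ⟨ha, hs⟩ | ⟨ha, hs⟩ <;> subst ha <;> subst hs <;>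
      simp [pvLoopA, pvLoopB, pvStateName_ne']
  | cons t ts ih =>
    intro i state alive hinv
    rcases hinv with ⟨ha, hs⟩ | ⟨ha, hs⟩
    · subst ha; subst hs
      rw [pvLoopA, pvLoopB, List.map]
      have hr : i % 4 < 4 := by omega
      rw [pvStepLive _ hr]
      by_cases ht : t = List.getD "abba".toList (i % 4) ' '
      · rw [if_pos ht]
        rw [ih (i + 1) _ true
          (Or.inl ⟨rfl, by rw [show (i + 1) % 4 = (i % 4 + 1) % 4 by omega]⟩)]
        simp [ht, pvStateName_ne]
      · rw [if_neg ht]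
        rw [ih (i + 1) _ false (Or.inr ⟨rfl, rfl⟩)]
        simp only [List.getD, show "abba".toList = ['a','b','b','a'] from rfl] at ht
        simp [ht, pvStateName_ne']
    · subst ha; subst hs
      rw [pvLoopA, pvLoopB, List.map, pvStepDead]
      rw [ih (i + 1) _ false (Or.inr ⟨rfl, rfl⟩)]
      simp

-- ===== VERDICT (by name: the statement is the Claim_ definition above) =====
theorem trace_acceptance_spec : Claim_equal_trace_acceptance := by
  intro s _
  unfold Spec_trace_acceptance trace_acceptance trace_acceptance_alt
  exact pvMain s.toList 0 "abba" true (Or.inl ⟨rfl, rfl⟩)
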